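-- pv_equiv track=rewrite | github.com/tuanngocfun/DNA_storage_locally_balance | src/lbcode/verifier.py | is_locally_balanced
-- ===== SOURCE A (Python) =====
-- def is_locally_balanced(x: str, ell: int, delta: int) -> bool:
--     """
--     Check if binary string x satisfies the (ℓ, δ)-locally balanced constraint.
--
--     Args:
--         x: Binary string (e.g., "01010101")
--         ell: Window length (must be even)
--         delta: Allowed deviation from ℓ/2
--
--     Returns:
--         True if all windows of length ℓ have weight in [ℓ/2 - δ, ℓ/2 + δ]
--
--     Raises:
--         ValueError: If ℓ is not even
--
--     Example:
--         >>> is_locally_balanced("01010", 4, 1)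
--         True
--         >>> is_locally_balanced("00000", 4, 1)
--         False  # Contains "0000" with weight 0
--     """
--     n = len(x)
--
--     if ell % 2 != 0:
--         raise ValueError("ℓ (ell) must be even per Definition 1")
--
--     # If string is shorter than window, no windows exist -> vacuously true
--     if n < ell:
--         return True
--
--     # Valid weight bounds
--     lo = ell // 2 - delta
--     hi = ell // 2 + delta
--
--     # Use prefix sums for O(1) window weight computation
--     prefix = [0] * (n + 1)
--     for i, ch in enumerate(x):
--         prefix[i + 1] = prefix[i] + (1 if ch == '1' else 0)
--
--     # Check all windows
--     for i in range(n - ell + 1):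
--         weight = prefix[i + ell] - prefix[i]
--         if weight < lo or weight > hi:
--             return False
--
--     return True
-- ===== SOURCE B (Python) =====
-- def is_locally_balanced(x: str, ell: int, delta: int) -> bool:
--     """Sliding-window re-implementation: one running weight, no prefix array."""
--     n = len(x)
--     if ell % 2 != 0:
--         raise ValueError("ℓ (ell) must be even per Definition 1")
--     if n < ell:
--         return True
--     lo = ell // 2 - delta
--     hi = ell // 2 + delta
--     w = sum(1 for ch in x[:ell] if ch == '1')
--     if w < lo or w > hi:
--         return False
--     for j in range(ell, n):
--         w += (1 if x[j] == '1' else 0) - (1 if x[j - ell] == '1' else 0)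
--         if w < lo or w > hi:
--             return False
--     return True
-- ===== Notes on version B (the rewrite author's own statement) =====
-- stated objective: alternative
-- what changed: Replaced the O(n) auxiliary prefix-sum array and per-window subtraction with a single running window weight that is updated in place while sliding (add entering bit, subtract leaving bit), checking bounds after each slide; no auxiliary array is built.
-- outside the precondition, e.g. on is_locally_balanced('100011', -2, 0): A returns False, B returns False
import Mathlib
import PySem

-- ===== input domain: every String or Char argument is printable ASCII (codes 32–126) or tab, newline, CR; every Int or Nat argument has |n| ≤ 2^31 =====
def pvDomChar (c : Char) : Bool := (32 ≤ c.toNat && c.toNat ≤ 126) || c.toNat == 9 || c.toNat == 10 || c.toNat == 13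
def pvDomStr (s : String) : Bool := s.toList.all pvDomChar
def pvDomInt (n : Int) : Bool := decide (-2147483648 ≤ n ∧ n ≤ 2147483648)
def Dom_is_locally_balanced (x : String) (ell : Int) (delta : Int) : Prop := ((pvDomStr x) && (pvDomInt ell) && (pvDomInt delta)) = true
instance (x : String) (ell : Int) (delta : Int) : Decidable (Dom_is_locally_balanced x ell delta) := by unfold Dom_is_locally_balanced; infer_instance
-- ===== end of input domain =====

-- B replaces A's auxiliary prefix-sum array by one running window weight updated while
-- sliding (O(1) extra space instead of O(n)); equal return values on Pre_ (even, nonnegative ell).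

-- '1 if ch == '1' else 0', shared by both ports
def pvBit (c : Char) : Int := if c = '1' then 1 else 0

-- ===== PORT A =====
def is_locally_balanced (x : String) (ell : Int) (delta : Int) : Bool :=
  let cs := x.toList
  let n : Int := cs.length
  if ell % 2 ≠ 0 then false    -- Python raises ValueError here; excluded by Pre_
  else if n < ell then true
  else
    let lo := PySem.Int.floordiv ell 2 - delta
    let hi := PySem.Int.floordiv ell 2 + delta
    -- prefix = [0]*(n+1); for i, ch in enumerate(x): prefix[i+1] = prefix[i] + (1 if ch == '1' else 0)
    let pre := cs.foldl (fun acc ch => acc ++ [(acc.getLast?.getD 0) + pvBit ch]) ([0] : List Int)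
    -- for i in range(n - ell + 1): … return False ≡ the loop finds no violating window
    !((PySem.List.pyRange 0 (n - ell + 1) 1).any (fun i =>
        let weight := PySem.List.pyGetD pre (i + ell) 0 - PySem.List.pyGetD pre i 0
        decide (weight < lo) || decide (weight > hi)))

-- ===== PORT B =====
-- the sliding loop of Source B: for j in range(ell, n): update w, early-return False on violation
def pvSlide (cs : List Char) (ell lo hi : Int) : List Int → Int → Bool
  | [], _ => true
  | j :: js, w =>
    let w' := w + pvBit (PySem.List.pyGetD cs j ' ') - pvBit (PySem.List.pyGetD cs (j - ell) ' ')
    if w' < lo ∨ w' > hi then false else pvSlide cs ell lo hi js w'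

def is_locally_balanced_alt (x : String) (ell : Int) (delta : Int) : Bool :=
  let cs := x.toList
  let n : Int := cs.length
  if ell % 2 ≠ 0 then false    -- Python raises ValueError here; excluded by Pre_
  else if n < ell then true
  else
    let lo := PySem.Int.floordiv ell 2 - delta
    let hi := PySem.Int.floordiv ell 2 + delta
    let w0 : Int := ((cs.take ell.toNat).filter (· = '1')).length
    if w0 < lo ∨ w0 > hi then false
    else pvSlide cs ell lo hi (PySem.List.pyRange ell n 1) w0

-- ===== PRECONDITION & SPEC =====
-- Pre_ excludes odd ell, on which A raises ValueError, and negative ell, which is outside the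
-- natural domain (window lengths): there A raises IndexError on most inputs and otherwise returns
-- an accidental early False produced by negative-index wraparound into the prefix array.
def Pre_is_locally_balanced (x : String) (ell : Int) (delta : Int) : Prop :=
  ell % 2 = 0 ∧ 0 ≤ ell
instance (x : String) (ell : Int) (delta : Int) : Decidable (Pre_is_locally_balanced x ell delta) := by
  unfold Pre_is_locally_balanced; infer_instance

def pvWitness_is_locally_balanced : String × Int × Int := ("01010", 4, 1)

def Spec_is_locally_balanced (x : String) (ell : Int) (delta : Int) (out : Bool) : Prop := out = is_locally_balanced_alt x ell delta
instance (x : String) (ell : Int) (delta : Int) (out : Bool) : Decidable (Spec_is_locally_balanced x ell delta out) := by unfold Spec_is_locally_balanced; infer_instance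

-- ===== CLAIM (what is proved, stated in full; the proofs are below) =====
def Claim_equal_is_locally_balanced : Prop := ∀ (x : String) (ell : Int) (delta : Int), Dom_is_locally_balanced x ell delta → Pre_is_locally_balanced x ell delta → Spec_is_locally_balanced x ell delta (is_locally_balanced x ell delta)

-- ===== LEMMAS AND PROOFS =====

-- weight of the length-k prefix of cs
def pvS (cs : List Char) (k : Nat) : Int := ((cs.take k).map pvBit).sum

lemma pvS_succ (cs : List Char) (k : Nat) (h : k < cs.length) :
    pvS cs (k+1) = pvS cs k + pvBit (cs.getD k ' ') := by
  unfold pvS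
  rw [← List.take_concat_get' _ _ h, List.map_append, List.sum_append]
  simp [List.getD, List.getElem?_eq_getElem h]

lemma fold_pre (cs : List Char) (acc : List Int) (s : Int) (h : acc.getLast? = some s) :
    cs.foldl (fun acc ch => acc ++ [(acc.getLast?.getD 0) + pvBit ch]) acc
      = acc ++ (List.range cs.length).map (fun k => s + pvS cs (k+1)) := by
  induction cs generalizing acc s with
  | nil => simp
  | cons c t ih =>
    simp only [List.foldl_cons, List.length_cons]
    rw [ih (acc ++ [acc.getLast?.getD 0 + pvBit c]) (s + pvBit c) (by simp [h])]
    rw [List.range_succ_eq_map]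
    simp only [h, Option.getD_some, List.map_cons, List.map_map, List.append_assoc]
    congr 1
    simp only [List.singleton_append]
    congr 1
    · simp [pvS]
    · congr 1
      funext k
      simp only [Function.comp_apply, pvS, List.map_cons, List.take_succ_cons, List.sum_cons]
      ring

lemma pre_eq (cs : List Char) :
    cs.foldl (fun acc ch => acc ++ [(acc.getLast?.getD 0) + pvBit ch]) ([0] : List Int)
      = (List.range (cs.length + 1)).map (fun k => pvS cs k) := by
  rw [fold_pre cs [0] 0 rfl, List.range_succ_eq_map]
  simp [pvS, List.map_map, Function.comp]

-- all windows ending at e, a.toNat < e ≤ |cs|, are in bounds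
lemma slide_iff (cs : List Char) (ell lo hi : Int) (hell : 0 ≤ ell) (a : Int)
    (ha : ell ≤ a) (han : a ≤ (cs.length : Int)) :
    (pvSlide cs ell lo hi (PySem.List.pyRange a (cs.length : Int) 1)
        (pvS cs a.toNat - pvS cs (a.toNat - ell.toNat)) = true)
    ↔ ∀ e : Nat, a.toNat < e → e ≤ cs.length →
        lo ≤ pvS cs e - pvS cs (e - ell.toNat) ∧ pvS cs e - pvS cs (e - ell.toNat) ≤ hi := by
  induction hh : ((cs.length : Int) - a).toNat generalizing a with
  | zero =>
    rw [PySem.List.pyRange_one_eq_nil (by omega)]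
    simp only [pvSlide]
    constructor
    · intro _ e he1 he2; omega
    · intro _; trivial
  | succ m ih =>
    have halt : a < (cs.length : Int) := by omega
    rw [PySem.List.pyRange_one_cons halt]
    simp only [pvSlide]
    have hg1 : PySem.List.pyGetD cs a ' ' = cs.getD a.toNat ' ' :=
      PySem.List.pyGetD_of_nonneg cs ' ' (by omega)
    have hg2 : PySem.List.pyGetD cs (a - ell) ' ' = cs.getD (a - ell).toNat ' ' :=
      PySem.List.pyGetD_of_nonneg cs ' ' (by omega)
    have hstep :
        pvS cs a.toNat - pvS cs (a.toNat - ell.toNat)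
          + pvBit (PySem.List.pyGetD cs a ' ') - pvBit (PySem.List.pyGetD cs (a - ell) ' ')
        = pvS cs (a.toNat + 1) - pvS cs (a.toNat + 1 - ell.toNat) := by
      rw [hg1, hg2]
      rw [pvS_succ cs a.toNat (by omega)]
      have h2 : a.toNat + 1 - ell.toNat = (a.toNat - ell.toNat) + 1 := by omega
      rw [h2, pvS_succ cs (a.toNat - ell.toNat) (by omega)]
      have h3 : (a - ell).toNat = a.toNat - ell.toNat := by omega
      rw [h3]; ring
    rw [hstep]
    by_cases hbad : pvS cs (a.toNat + 1) - pvS cs (a.toNat + 1 - ell.toNat) < lo ∨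
        pvS cs (a.toNat + 1) - pvS cs (a.toNat + 1 - ell.toNat) > hi
    · rw [if_pos hbad]
      constructor
      · intro h; simp at h
      · intro hall
        exfalso
        have := hall (a.toNat + 1) (by omega) (by omega)
        omega
    · rw [if_neg hbad]
      have ha1 : (a + 1).toNat = a.toNat + 1 := by omega
      have hrec := ih (a + 1) (by omega) (by omega) (by omega)
      rw [ha1] at hrec
      rcases not_or.mp hbad with ⟨hb1, hb2⟩
      constructor
      · intro h e he1 he2
        by_cases he : a.toNat + 1 = e
        · subst he; omega
        · exact hrec.mp h e (by omega) he2
      · intro hall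
        exact hrec.mpr (fun e he1 he2 => hall e (by omega) he2)

-- ===== VERDICT (by name: the statement is the Claim_ definition above) =====
theorem is_locally_balanced_spec : Claim_equal_is_locally_balanced := by
  intro x ell delta _ hpre
  obtain ⟨h2, h0⟩ := hpre
  unfold Spec_is_locally_balanced is_locally_balanced is_locally_balanced_alt
  have hM : ¬ (ell % 2 ≠ 0) := by simp [h2]
  rw [if_neg hM]
  conv_rhs => rw [if_neg hM]
  by_cases hn : ((x.toList.length : Int) < ell)
  · rw [if_pos hn, if_pos hn]
  · rw [if_neg hn, if_neg hn]
    set cs := x.toList with hcs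
    set lo := PySem.Int.floordiv ell 2 - delta with hlo
    set hi := PySem.Int.floordiv ell 2 + delta with hhi
    set L := ell.toNat with hL
    have hLle : L ≤ cs.length := by omega
    have hw0 : ((((cs.take L).filter (· = '1')).length : Int)) = pvS cs L := by
      unfold pvS pvBit
      rw [← List.countP_eq_length_filter]
      have hpe : (fun (c : Char) => if c = '1' then (1:Int) else 0)
          = (fun c => if (c == '1') = true then (1:Int) else 0) := by
        funext c; simp
      rw [hpe, PySem.List.sum_map_ite_one_zero]
      congr 1
    have hinit : ((((cs.take L).filter (· = '1')).length : Int)) = pvS cs ell.toNat - pvS cs (ell.toNat - L) := by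
      rw [hw0]
      have hz : ell.toNat - L = 0 := by omega
      rw [← hL, hz]
      simp [pvS]
    apply Bool.coe_iff_coe.mp
    rw [Bool.not_eq_eq_eq_not, Bool.not_true, List.any_eq_false]
    constructor
    · intro hA
      have hok : ∀ e : Nat, L ≤ e → e ≤ cs.length →
          lo ≤ pvS cs e - pvS cs (e - L) ∧ pvS cs e - pvS cs (e - L) ≤ hi := by
        intro e he1 he2
        have hi0 : ((e - L : Nat) : Int) ∈ PySem.List.pyRange 0 ((cs.length : Int) - ell + 1) 1 := by
          rw [PySem.List.mem_pyRange_one]; omega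
        have hthis := hA _ hi0
        simp only [pre_eq, decide_eq_true_eq, Bool.or_eq_true, not_or] at hthis
        have hga : PySem.List.pyGetD ((List.range (cs.length + 1)).map (fun k => pvS cs k)) (((e - L : Nat) : Int) + ell) 0 = pvS cs e := by
          rw [PySem.List.pyGetD_of_nonneg _ _ (by omega),
              PySem.List.getD_map_range _ _ _ _ (by omega)]
          congr 1; omega
        have hgb : PySem.List.pyGetD ((List.range (cs.length + 1)).map (fun k => pvS cs k)) ((e - L : Nat) : Int) 0 = pvS cs (e - L) := by
          rw [PySem.List.pyGetD_of_nonneg _ _ (by omega),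
              PySem.List.getD_map_range _ _ _ _ (by omega)]
          simp
        rw [hga, hgb] at hthis
        omega
      have hfirst := hok L (le_refl L) hLle
      have hz : L - L = 0 := Nat.sub_self L
      rw [hz] at hfirst
      have hS0 : pvS cs 0 = 0 := by simp [pvS]
      rw [hS0] at hfirst
      rw [if_neg (by rw [hw0]; omega)]
      rw [hinit, slide_iff cs ell lo hi h0 ell (le_refl ell) (by omega)]
      intro e he1 he2
      exact hok e (by omega) he2
    · intro hB i hi0
      rw [PySem.List.mem_pyRange_one] at hi0
      by_cases hbad0 : ((((cs.take L).filter (· = '1')).length : Int)) < lo ∨ ((((cs.take L).filter (· = '1')).length : Int)) > hi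
      · rw [if_pos hbad0] at hB; exact absurd hB (by simp)
      · rw [if_neg hbad0] at hB
        rw [hinit, slide_iff cs ell lo hi h0 ell (le_refl ell) (by omega)] at hB
        have hok : ∀ e : Nat, L ≤ e → e ≤ cs.length →
            lo ≤ pvS cs e - pvS cs (e - L) ∧ pvS cs e - pvS cs (e - L) ≤ hi := by
          intro e he1 he2
          by_cases heL : e = L
          · rw [hw0] at hbad0
            rw [heL, Nat.sub_self]
            have hS0 : pvS cs 0 = 0 := by simp [pvS]
            rw [hS0]
            omega
          · exact hB e (by omega) he2
        simp only [pre_eq, decide_eq_true_eq, Bool.or_eq_true, not_or]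
        have hga : PySem.List.pyGetD ((List.range (cs.length + 1)).map (fun k => pvS cs k)) (i + ell) 0 = pvS cs (i + ell).toNat := by
          rw [PySem.List.pyGetD_of_nonneg _ _ (by omega),
              PySem.List.getD_map_range _ _ _ _ (by omega)]
        have hgb : PySem.List.pyGetD ((List.range (cs.length + 1)).map (fun k => pvS cs k)) i 0 = pvS cs i.toNat := by
          rw [PySem.List.pyGetD_of_nonneg _ _ (by omega),
              PySem.List.getD_map_range _ _ _ _ (by omega)]
        rw [hga, hgb]
        have heq : i.toNat = (i + ell).toNat - L := by omega
        rw [heq]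
        have hw := hok ((i + ell).toNat) (by omega) (by omega)
        omega
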